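-- pv_equiv track=rewrite | github.com/Engagic/engagic | vendors/adapters/legistar_adapter.py | _filter_leg_ver_attachments
-- ===== SOURCE A (Python) =====
-- from typing import Dict, Any, Iterator, Optional, List
--
-- def _filter_leg_ver_attachments(attachments: List[Dict[str, Any]]) -> List[Dict[str, Any]]:
--     """
--     Filter attachments to include at most one 'Leg Ver' attachment.
--     Prefer 'Leg Ver2' over 'Leg Ver1' if both exist.
--
--     Args:
--         attachments: List of attachment dictionaries
--
--     Returns:
--         Filtered list of attachments
--     """
--     leg_ver_attachments = []
--     other_attachments = []
--
--     for att in attachments: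
--         name = att.get('name', '').lower()
--         if 'leg ver' in name:
--             leg_ver_attachments.append(att)
--         else:
--             other_attachments.append(att)
--
--     # Select best Leg Ver attachment
--     selected_leg_ver = None
--     if leg_ver_attachments:
--         # Prefer Leg Ver2, then Leg Ver1, then any Leg Ver
--         for att in leg_ver_attachments:
--             name = att.get('name', '').lower()
--             if 'leg ver2' in name or 'leg ver 2' in name:
--                 selected_leg_ver = att
--                 break
--
--         # If no Ver2, look for Ver1
--         if not selected_leg_ver:
--             for att in leg_ver_attachments:
--                 name = att.get('name', '').lower()
--                 if 'leg ver1' in name or 'leg ver 1' in name: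
--                     selected_leg_ver = att
--                     break
--
--         # If no Ver1 or Ver2, just take the first one
--         if not selected_leg_ver:
--             selected_leg_ver = leg_ver_attachments[0]
--
--     # Combine: at most one Leg Ver + all other attachments
--     filtered = other_attachments
--     if selected_leg_ver:
--         filtered.insert(0, selected_leg_ver)
--
--     return filtered
-- ===== SOURCE B (Python) =====
-- def _filter_leg_ver_attachments(attachments):
--     """One pass: collect non-'leg ver' attachments, track the best-ranked
--     'leg ver' attachment (Ver2 > Ver1 > plain; first occurrence of the best
--     rank wins), then prepend the winner if any."""
--     others = []
--     best = None
--     best_rank = 0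
--     for att in attachments:
--         name = att.get('name', '').lower()
--         if 'leg ver' not in name:
--             others.append(att)
--         else:
--             if 'leg ver2' in name or 'leg ver 2' in name:
--                 rank = 3
--             elif 'leg ver1' in name or 'leg ver 1' in name:
--                 rank = 2
--             else:
--                 rank = 1
--             if rank > best_rank:
--                 best = att
--                 best_rank = rank
--     if best is not None:
--         return [best] + others
--     return others
-- ===== Notes on version B (the rewrite author's own statement) =====
-- stated objective: simpler
-- what changed: Replaced A's three scans (partition, find-Ver2, find-Ver1) plus a front insert by one pass that ranks each 'leg ver' attachment (Ver2=3, Ver1=2, other=1) and keeps the first attachment of the highest rank, prepending it at the end.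
import Mathlib
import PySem

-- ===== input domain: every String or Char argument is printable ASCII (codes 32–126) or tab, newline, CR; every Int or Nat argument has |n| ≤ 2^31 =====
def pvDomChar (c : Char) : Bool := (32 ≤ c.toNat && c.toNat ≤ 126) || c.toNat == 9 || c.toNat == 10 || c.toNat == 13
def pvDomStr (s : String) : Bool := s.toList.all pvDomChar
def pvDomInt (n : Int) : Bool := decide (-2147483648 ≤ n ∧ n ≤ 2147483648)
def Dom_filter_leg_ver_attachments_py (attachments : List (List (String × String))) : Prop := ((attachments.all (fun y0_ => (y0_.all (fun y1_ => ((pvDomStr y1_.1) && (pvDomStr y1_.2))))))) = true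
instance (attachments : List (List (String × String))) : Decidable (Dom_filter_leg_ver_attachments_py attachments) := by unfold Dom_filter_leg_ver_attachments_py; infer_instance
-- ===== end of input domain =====

-- B replaces A's three scans (partition, find Ver2, find Ver1) by a single ranked pass; objective: simpler.

-- shared by both ports: att.get('name', '').lower()
def pvName (att : List (String × String)) : String :=
  PySem.Str.lower ((PySem.Dict.mk att).getD "name" "")

-- ===== PORT A =====
-- first 'for att in leg_ver_attachments: … ver2 … break'
def pvFindVer2 : List (List (String × String)) → Option (List (String × String))
  | [] => none
  | att :: rest =>
    if PySem.Str.isIn "leg ver2" (pvName att) || PySem.Str.isIn "leg ver 2" (pvName att)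
    then some att else pvFindVer2 rest

-- second 'for att in leg_ver_attachments: … ver1 … break'
def pvFindVer1 : List (List (String × String)) → Option (List (String × String))
  | [] => none
  | att :: rest =>
    if PySem.Str.isIn "leg ver1" (pvName att) || PySem.Str.isIn "leg ver 1" (pvName att)
    then some att else pvFindVer1 rest

def filter_leg_ver_attachments_py (attachments : List (List (String × String))) : List (List (String × String)) :=
  -- partition loop
  let p := attachments.foldl
    (fun (acc : List (List (String × String)) × List (List (String × String))) att =>
      if PySem.Str.isIn "leg ver" (pvName att) then (acc.1 ++ [att], acc.2)
      else (acc.1, acc.2 ++ [att]))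
    ([], [])
  let legVer := p.1
  let others := p.2
  -- selection: Ver2, then Ver1, then leg_ver_attachments[0] (guarded by non-emptiness, as in A)
  let selected : Option (List (String × String)) :=
    if legVer.isEmpty then none
    else
      match pvFindVer2 legVer with
      | some a => some a
      | none =>
        match pvFindVer1 legVer with
        | some a => some a
        | none => legVer.head?
  -- filtered = other_attachments; filtered.insert(0, selected) when selected
  match selected with
  | some a => a :: others
  | none => others

-- ===== PORT B =====
def pvRank (name : String) : Int :=
  if PySem.Str.isIn "leg ver2" name || PySem.Str.isIn "leg ver 2" name then 3
  else if PySem.Str.isIn "leg ver1" name || PySem.Str.isIn "leg ver 1" name then 2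
  else 1

def filter_leg_ver_attachments_py_alt (attachments : List (List (String × String))) : List (List (String × String)) :=
  let st := attachments.foldl
    (fun (st : List (List (String × String)) × Option (List (String × String)) × Int) att =>
      let name := pvName att
      if ¬ (PySem.Str.isIn "leg ver" name) then (st.1 ++ [att], st.2.1, st.2.2)
      else
        let r := pvRank name
        if r > st.2.2 then (st.1, some att, r) else st)
    ([], none, 0)
  match st.2.1 with
  | some b => b :: st.1
  | none => st.1

-- ===== PRECONDITION & SPEC =====
def Spec_filter_leg_ver_attachments_py (attachments : List (List (String × String))) (out : List (List (String × String))) : Prop := out = filter_leg_ver_attachments_py_alt attachments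
instance (attachments : List (List (String × String))) (out : List (List (String × String))) : Decidable (Spec_filter_leg_ver_attachments_py attachments out) := by unfold Spec_filter_leg_ver_attachments_py; infer_instance

-- ===== CLAIM (what is proved, stated in full; the proofs are below) =====
def Claim_equal_filter_leg_ver_attachments_py : Prop := ∀ (attachments : List (List (String × String))), Dom_filter_leg_ver_attachments_py attachments → Spec_filter_leg_ver_attachments_py attachments (filter_leg_ver_attachments_py attachments)

-- ===== LEMMAS AND PROOFS =====

def pvLeg (att : List (String × String)) : Bool := PySem.Str.isIn "leg ver" (pvName att)

def pvUpd (s : Option (List (String × String)) × Int) (att : List (String × String)) :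
    Option (List (String × String)) × Int :=
  if pvRank (pvName att) > s.2 then (some att, pvRank (pvName att)) else s

theorem pvRank_le (n : String) : pvRank n ≤ 3 := by
  unfold pvRank; split_ifs <;> norm_num

theorem pvRank_pos (n : String) : 0 < pvRank n := by
  unfold pvRank; split_ifs <;> norm_num

theorem a_fold (l : List (List (String × String)))
    (ls os : List (List (String × String))) :
    l.foldl
      (fun (acc : List (List (String × String)) × List (List (String × String))) att =>
        if PySem.Str.isIn "leg ver" (pvName att) then (acc.1 ++ [att], acc.2)
        else (acc.1, acc.2 ++ [att]))
      (ls, os)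
    = (ls ++ l.filter pvLeg, os ++ l.filter (fun a => !pvLeg a)) := by
  induction l generalizing ls os with
  | nil => simp
  | cons x xs ih =>
    simp only [List.foldl_cons, List.filter_cons]
    by_cases h : PySem.Str.isIn "leg ver" (pvName x) = true
    · have hb : pvLeg x = true := h
      rw [if_pos h, ih, if_pos hb, if_neg (by rw [hb]; simp)]
      simp
    · simp only [Bool.not_eq_true] at h
      have hb : pvLeg x = false := h
      rw [if_neg (by rw [h]; simp), ih, if_neg (by rw [hb]; simp),
          if_pos (by rw [hb]; simp)]
      simp

theorem b_fold (l : List (List (String × String)))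
    (os : List (List (String × String)))
    (b : Option (List (String × String))) (r : Int) :
    l.foldl
      (fun (st : List (List (String × String)) × Option (List (String × String)) × Int) att =>
        let name := pvName att
        if ¬ (PySem.Str.isIn "leg ver" name) then (st.1 ++ [att], st.2.1, st.2.2)
        else
          let r := pvRank name
          if r > st.2.2 then (st.1, some att, r) else st)
      (os, b, r)
    = (os ++ l.filter (fun a => !pvLeg a), (l.filter pvLeg).foldl pvUpd (b, r)) := by
  induction l generalizing os b r with
  | nil => simp
  | cons x xs ih =>
    simp only [List.foldl_cons, List.filter_cons]
    by_cases h : PySem.Str.isIn "leg ver" (pvName x) = true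
    · have hb : pvLeg x = true := h
      rw [if_neg (show ¬(¬PySem.Str.isIn "leg ver" (pvName x) = true) from not_not_intro h),
          if_pos (show pvLeg x = true from hb),
          if_neg (show ¬((!pvLeg x) = true) from by rw [hb]; simp),
          List.foldl_cons]
      by_cases hr : pvRank (pvName x) > r
      · rw [if_pos hr, show pvUpd (b, r) x = (some x, pvRank (pvName x)) from if_pos hr, ih]
      · rw [if_neg hr, show pvUpd (b, r) x = (b, r) from if_neg hr, ih]
    · simp only [Bool.not_eq_true] at h
      have hb : pvLeg x = false := h
      rw [if_pos (show (¬PySem.Str.isIn "leg ver" (pvName x) = true) from by rw [h]; simp),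
          if_neg (show ¬(pvLeg x = true) from by rw [hb]; simp),
          if_pos (show (!pvLeg x) = true from by rw [hb]; simp), ih]
      simp

theorem upd_three (ls : List (List (String × String))) (x : List (String × String)) :
    ls.foldl pvUpd (some x, 3) = (some x, 3) := by
  induction ls with
  | nil => rfl
  | cons y ys ih =>
    have := pvRank_le (pvName y)
    simp only [List.foldl_cons, pvUpd]
    rw [if_neg (show ¬pvRank (pvName y) > ((some x : Option _), (3:Int)).2 from by simp; omega)]
    exact ih

theorem upd_two (ls : List (List (String × String))) (x : List (String × String)) :
    ls.foldl pvUpd (some x, 2)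
    = (match pvFindVer2 ls with
       | some a => (some a, 3)
       | none => (some x, 2)) := by
  induction ls with
  | nil => rfl
  | cons y ys ih =>
    simp only [List.foldl_cons, pvUpd, pvFindVer2]
    by_cases h2 : (PySem.Str.isIn "leg ver2" (pvName y)
        || PySem.Str.isIn "leg ver 2" (pvName y)) = true
    · have hr : pvRank (pvName y) = 3 := by unfold pvRank; rw [if_pos h2]
      rw [hr, if_pos (show (3:Int) > ((some x : Option _), (2:Int)).2 from by norm_num),
          if_pos h2, upd_three]
    · have hr : pvRank (pvName y) ≤ 2 := by
        unfold pvRank; rw [if_neg h2]; split_ifs <;> norm_num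
      rw [if_neg (show ¬pvRank (pvName y) > ((some x : Option _), (2:Int)).2 from by simp; omega),
          if_neg h2, ih]

theorem upd_one (ls : List (List (String × String))) (x : List (String × String)) :
    ls.foldl pvUpd (some x, 1)
    = (match pvFindVer2 ls with
       | some a => (some a, 3)
       | none =>
         match pvFindVer1 ls with
         | some a => (some a, 2)
         | none => (some x, 1)) := by
  induction ls with
  | nil => rfl
  | cons y ys ih =>
    simp only [List.foldl_cons, pvUpd, pvFindVer2, pvFindVer1]
    by_cases h2 : (PySem.Str.isIn "leg ver2" (pvName y)
        || PySem.Str.isIn "leg ver 2" (pvName y)) = true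
    · have hr : pvRank (pvName y) = 3 := by unfold pvRank; rw [if_pos h2]
      rw [hr, if_pos (show (3:Int) > ((some x : Option _), (1:Int)).2 from by norm_num),
          if_pos h2, upd_three]
    · by_cases h1 : (PySem.Str.isIn "leg ver1" (pvName y)
          || PySem.Str.isIn "leg ver 1" (pvName y)) = true
      · have hr : pvRank (pvName y) = 2 := by
          unfold pvRank; rw [if_neg h2, if_pos h1]
        rw [hr, if_pos (show (2:Int) > ((some x : Option _), (1:Int)).2 from by norm_num),
            if_neg h2, if_pos h1, upd_two]
      · have hr : pvRank (pvName y) = 1 := by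
          unfold pvRank; rw [if_neg h2, if_neg h1]
        rw [hr, if_neg (show ¬(1:Int) > ((some x : Option _), (1:Int)).2 from by norm_num),
            if_neg h2, if_neg h1, ih]

-- ===== VERDICT (by name: the statement is the Claim_ definition above) =====
theorem filter_leg_ver_attachments_py_spec : Claim_equal_filter_leg_ver_attachments_py := by
  intro l _
  unfold Spec_filter_leg_ver_attachments_py
  unfold filter_leg_ver_attachments_py filter_leg_ver_attachments_py_alt
  rw [a_fold l [] [], b_fold l [] none 0]
  simp only [List.nil_append]
  cases hlegs : l.filter pvLeg with
  | nil => simp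
  | cons x rest =>
    simp only [List.isEmpty_cons, Bool.false_eq_true, if_false, List.head?_cons,
      List.foldl_cons]
    rw [show pvUpd (none, 0) x = (some x, pvRank (pvName x)) from
      if_pos (show pvRank (pvName x) > ((none : Option _), (0:Int)).2 from by
        have := pvRank_pos (pvName x); simpa using this)]
    by_cases h2 : (PySem.Str.isIn "leg ver2" (pvName x)
        || PySem.Str.isIn "leg ver 2" (pvName x)) = true
    · have hr : pvRank (pvName x) = 3 := by unfold pvRank; rw [if_pos h2]
      rw [hr, upd_three,
          show pvFindVer2 (x :: rest) = some x from by simp only [pvFindVer2]; rw [if_pos h2]]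
    · by_cases h1 : (PySem.Str.isIn "leg ver1" (pvName x)
          || PySem.Str.isIn "leg ver 1" (pvName x)) = true
      · have hr : pvRank (pvName x) = 2 := by
          unfold pvRank; rw [if_neg h2, if_pos h1]
        rw [hr, upd_two,
            show pvFindVer2 (x :: rest) = pvFindVer2 rest from by simp only [pvFindVer2]; rw [if_neg h2],
            show pvFindVer1 (x :: rest) = some x from by simp only [pvFindVer1]; rw [if_pos h1]]
        cases pvFindVer2 rest <;> simp
      · have hr : pvRank (pvName x) = 1 := by
          unfold pvRank; rw [if_neg h2, if_neg h1]
        rw [hr, upd_one,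
            show pvFindVer2 (x :: rest) = pvFindVer2 rest from by simp only [pvFindVer2]; rw [if_neg h2],
            show pvFindVer1 (x :: rest) = pvFindVer1 rest from by simp only [pvFindVer1]; rw [if_neg h1]]
        cases pvFindVer2 rest <;> cases pvFindVer1 rest <;> simp
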